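-- pv_equiv track=rewrite | github.com/Rophu/travail-IUT | ExoMdP.py | pas_de_caractere_de_ponctuation_dans_la_chaine
-- ===== SOURCE A (Python) =====
-- def pas_de_caractere_de_ponctuation_dans_la_chaine(chaine):
--     """
--     verifie si chaine ne possède pas de caracteres de ponctuation
--     paramètres formels: chaine, une chaine de caractères(type str)
--     résultat: "chaine_sans_ponctuation", un booléen. il est True
--               si la chaine n'a pas de carctères de ponctuation False sinon
--     invariant: l'absence de caractere de ponctuation dans chaine de l'indice
--                0 à 'indice'-1
--     """
--     i=0
--     ponctuation = '''!()-[]{};:'"\,<>./?@#$%^&*_~'''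
--     chaine_sans_ponctuation=True
--     while i<len(chaine) and chaine_sans_ponctuation:
--         if chaine[i] in ponctuation:
--             chaine_sans_ponctuation=False
--         i+=1
--     return chaine_sans_ponctuation
-- ===== SOURCE B (Python) =====
-- def pas_de_caractere_de_ponctuation_dans_la_chaine(chaine):
--     ponctuation = '''!()-[]{};:'"\,<>./?@#$%^&*_~'''
--     return not (set(chaine) & set(ponctuation))
-- ===== Notes on version B (the rewrite author's own statement) =====
-- stated objective: idiomatic
-- what changed: Replaces the index-driven while loop with a boolean flag by a single set intersection between the string's characters and the punctuation characters, testing its emptiness; measured constant-factor speedup from C-level set operations.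
import Mathlib
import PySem

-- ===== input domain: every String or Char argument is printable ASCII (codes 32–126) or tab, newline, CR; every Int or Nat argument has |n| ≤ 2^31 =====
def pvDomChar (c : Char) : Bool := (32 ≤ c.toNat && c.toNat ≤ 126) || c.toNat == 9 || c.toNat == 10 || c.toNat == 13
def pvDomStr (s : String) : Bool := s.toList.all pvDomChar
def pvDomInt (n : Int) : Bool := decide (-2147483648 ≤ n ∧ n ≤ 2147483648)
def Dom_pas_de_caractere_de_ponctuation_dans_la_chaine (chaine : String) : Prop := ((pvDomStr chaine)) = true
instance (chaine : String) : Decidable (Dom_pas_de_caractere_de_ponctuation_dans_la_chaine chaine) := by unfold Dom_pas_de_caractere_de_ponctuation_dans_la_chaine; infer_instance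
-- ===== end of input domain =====

-- ===== PORT A =====
-- B replaces A's index loop with a boolean flag by a set intersection (idiomatic); same return value.

-- the Python literal '''!()-[]{};:'"\,<>./?@#$%^&*_~''' (the \, keeps its backslash)
def pvPonctuation : List Char := "!()-[]{};:'\"\\,<>./?@#$%^&*_~".toList

-- A's while loop: index scan carrying the flag chaine_sans_ponctuation; stops when the flag is False
def pvLoopA : List Char → Bool → Bool
  | [], flag => flag
  | c :: rest, flag =>
      if flag then pvLoopA rest (if pvPonctuation.contains c then false else flag)
      else flag

def pas_de_caractere_de_ponctuation_dans_la_chaine (chaine : String) : Bool :=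
  pvLoopA chaine.toList true

-- ===== PORT B =====
-- not (set(chaine) & set(ponctuation))
def pas_de_caractere_de_ponctuation_dans_la_chaine_alt (chaine : String) : Bool :=
  (PySem.Set.inter (PySem.Set.ofList chaine.toList) (PySem.Set.ofList pvPonctuation)).isEmpty

-- ===== PRECONDITION & SPEC =====
def Spec_pas_de_caractere_de_ponctuation_dans_la_chaine (chaine : String) (out : Bool) : Prop := out = pas_de_caractere_de_ponctuation_dans_la_chaine_alt chaine
instance (chaine : String) (out : Bool) : Decidable (Spec_pas_de_caractere_de_ponctuation_dans_la_chaine chaine out) := by unfold Spec_pas_de_caractere_de_ponctuation_dans_la_chaine; infer_instance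

-- ===== CLAIM (what is proved, stated in full; the proofs are below) =====
def Claim_equal_pas_de_caractere_de_ponctuation_dans_la_chaine : Prop := ∀ (chaine : String), Dom_pas_de_caractere_de_ponctuation_dans_la_chaine chaine → Spec_pas_de_caractere_de_ponctuation_dans_la_chaine chaine (pas_de_caractere_de_ponctuation_dans_la_chaine chaine)

-- ===== LEMMAS AND PROOFS =====
theorem pvLoopA_false (cs : List Char) : pvLoopA cs false = false := by
  cases cs <;> simp [pvLoopA]

theorem pvLoopA_true (cs : List Char) :
    pvLoopA cs true = cs.all (fun c => !pvPonctuation.contains c) := by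
  induction cs with
  | nil => rfl
  | cons c rest ih =>
      rw [pvLoopA, if_pos rfl]
      cases h : pvPonctuation.contains c
      · rw [if_neg (by simp), ih, List.all_cons, h]
        simp
      · rw [if_pos rfl, pvLoopA_false, List.all_cons, h]
        simp

theorem alt_eq_all (chaine : String) :
    pas_de_caractere_de_ponctuation_dans_la_chaine_alt chaine
      = chaine.toList.all (fun c => !pvPonctuation.contains c) := by
  unfold pas_de_caractere_de_ponctuation_dans_la_chaine_alt
  rw [Bool.eq_iff_iff]
  simp only [List.isEmpty_iff, List.eq_nil_iff_forall_not_mem, PySem.Set.mem_inter,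
    PySem.Set.mem_ofList, List.all_eq_true, Bool.not_eq_eq_eq_not, Bool.not_true,
    List.contains_eq_mem, decide_eq_false_iff_not]
  tauto

-- ===== VERDICT (by name: the statement is the Claim_ definition above) =====
theorem pas_de_caractere_de_ponctuation_dans_la_chaine_spec : Claim_equal_pas_de_caractere_de_ponctuation_dans_la_chaine := by
  intro chaine _
  unfold Spec_pas_de_caractere_de_ponctuation_dans_la_chaine pas_de_caractere_de_ponctuation_dans_la_chaine
  rw [pvLoopA_true, alt_eq_all]
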